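-- pv_equiv track=rewrite | github.com/ngocthienta/pytest | INTEK_test.py | is_a_condition_true
-- ===== SOURCE A (Python) =====
-- def is_a_condition_true(cond):
--     if not isinstance(cond,list):
--         raise TypeError('A list is expected')
--     for i in cond:
--         if not isinstance(i,bool):
--             raise ValueError('The list must contain either booleans or nothing at all')
--     if not cond:
--         result = None
--     else:
--         if True in cond:
--             result = True
--         else:
--             result = False
--     return result
-- ===== SOURCE B (Python) =====
-- def is_a_condition_true(cond):
--     if not isinstance(cond, list):
--         raise TypeError('A list is expected')
--     result = None
--     for i in cond:
--         if not isinstance(i, bool):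
--             raise ValueError('The list must contain either booleans or nothing at all')
--         result = bool(result) | i
--     return result
-- ===== Notes on version B (the rewrite author's own statement) =====
-- stated objective: alternative
-- what changed: Replaces A's staged structure (validate-all loop, empty-case branch, then a 'True in cond' membership scan) by one pass over an Optional accumulator that starts at None and becomes bool(acc)|i at each element, so the empty case needs no branch.
import Mathlib
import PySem

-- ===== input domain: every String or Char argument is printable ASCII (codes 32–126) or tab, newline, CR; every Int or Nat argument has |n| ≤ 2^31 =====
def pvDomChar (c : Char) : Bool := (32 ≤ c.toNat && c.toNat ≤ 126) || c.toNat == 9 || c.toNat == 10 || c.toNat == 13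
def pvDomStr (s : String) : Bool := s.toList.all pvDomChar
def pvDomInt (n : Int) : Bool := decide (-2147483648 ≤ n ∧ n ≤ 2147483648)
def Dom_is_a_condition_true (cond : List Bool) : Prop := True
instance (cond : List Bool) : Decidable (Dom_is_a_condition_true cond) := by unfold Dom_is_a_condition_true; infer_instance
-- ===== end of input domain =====

-- B replaces A's staged structure (validate loop, empty branch, membership scan) by one
-- pass over an Optional accumulator starting at None, so the empty case needs no branch.
-- Under the type convention (List Bool) the isinstance guards of both programs never fire.

-- ===== PORT A =====
-- A: the validation loop never raises on List Bool; then 'True in cond' as list membership.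
def is_a_condition_true (cond : List Bool) : Option Bool :=
  if cond = [] then none
  else if cond.contains true then some true else some false

-- ===== PORT B =====
-- the isinstance(i, bool) check always succeeds on List Bool; bool(None) = false
def is_a_condition_true_alt (cond : List Bool) : Option Bool :=
  cond.foldl (fun result i => some (result.getD false || i)) none

-- ===== PRECONDITION & SPEC =====
def Spec_is_a_condition_true (cond : List Bool) (out : Option Bool) : Prop := out = is_a_condition_true_alt cond
instance (cond : List Bool) (out : Option Bool) : Decidable (Spec_is_a_condition_true cond out) := by unfold Spec_is_a_condition_true; infer_instance

-- ===== CLAIM =====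
def Claim_equal_is_a_condition_true : Prop := ∀ (cond : List Bool), Dom_is_a_condition_true cond → Spec_is_a_condition_true cond (is_a_condition_true cond)

-- ===== LEMMAS AND PROOFS =====
theorem pv_foldl_some (cond : List Bool) (b : Bool) :
    cond.foldl (fun result i => some (result.getD false || i)) (some b)
      = some (b || cond.contains true) := by
  induction cond generalizing b with
  | nil => simp
  | cons h t ih => rw [List.foldl_cons, ih]; cases h <;> cases b <;> simp

-- ===== VERDICT =====
theorem is_a_condition_true_spec : Claim_equal_is_a_condition_true := by
  intro cond _
  unfold Spec_is_a_condition_true is_a_condition_true is_a_condition_true_alt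
  match cond with
  | [] => rfl
  | h :: t =>
    rw [List.foldl_cons, pv_foldl_some]
    simp only [reduceCtorEq, if_false, Option.getD_none, Bool.false_or,
      List.contains_cons, List.contains_eq_mem]
    by_cases hh : h = true
    · simp [hh]
    · by_cases ht : true ∈ t <;> simp [hh, ht]
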